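-- pv_equiv track=rewrite | github.com/jcoboss/Proyecto2Algoritmos | Ambiente.py | obtenerPuntosSolidoCubo
-- ===== SOURCE A (Python) =====
-- def obtenerPuntosSolidoCubo(x,y,z,arista):
--     xs=[]
--     ys=[]
--     zs=[]
--     for i in range(x, x + arista):
--         for j in range(y, y + arista):
--             for k in range(z, z + arista):
--                 xs.append(i)
--                 ys.append(j)
--                 zs.append(k)
--     return [xs,ys,zs]
-- ===== SOURCE B (Python) =====
-- def obtenerPuntosSolidoCubo(x, y, z, arista):
--     n = max(arista, 0)
--     xs = [i for i in range(x, x + arista) for _ in range(n * n)]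
--     ys = [j for j in range(y, y + arista) for _ in range(n)] * n
--     zs = list(range(z, z + arista)) * (n * n)
--     return [xs, ys, zs]
-- ===== Notes on version B (the rewrite author's own statement) =====
-- stated objective: simpler
-- what changed: Replaces the fused triple nested loop that appends to xs/ys/zs in lockstep with three independent one-liner constructions from the repetition structure (each x repeated arista^2 times, the y-block repeated arista times, the z-range repeated arista^2 times).
import Mathlib
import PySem

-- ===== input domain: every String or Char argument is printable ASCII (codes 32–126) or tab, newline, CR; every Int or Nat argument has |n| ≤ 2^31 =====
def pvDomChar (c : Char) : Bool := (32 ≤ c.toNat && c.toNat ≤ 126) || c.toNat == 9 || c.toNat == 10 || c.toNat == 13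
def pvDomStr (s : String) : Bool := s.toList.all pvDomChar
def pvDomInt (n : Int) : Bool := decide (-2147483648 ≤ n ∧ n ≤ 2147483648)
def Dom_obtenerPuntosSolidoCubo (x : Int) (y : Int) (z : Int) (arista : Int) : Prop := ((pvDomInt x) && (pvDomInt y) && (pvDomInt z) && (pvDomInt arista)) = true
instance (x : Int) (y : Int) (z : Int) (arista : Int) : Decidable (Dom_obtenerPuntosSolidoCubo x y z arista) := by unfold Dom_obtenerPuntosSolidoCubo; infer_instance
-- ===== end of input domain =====

-- B builds the three coordinate lists independently from their repetition structure
-- (each value replicated / each block repeated) instead of A's fused triple nested loop; objective: simpler.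

-- ===== PORT A =====
-- A: triple nested loop appending i, j, k to xs/ys/zs in lockstep.
def obtenerPuntosSolidoCubo (x : Int) (y : Int) (z : Int) (arista : Int) : List (List Int) :=
  let s :=
    (PySem.List.pyRange x (x + arista) 1).foldl (fun s i =>
      (PySem.List.pyRange y (y + arista) 1).foldl (fun s j =>
        (PySem.List.pyRange z (z + arista) 1).foldl (fun s k =>
          (s.1 ++ [i], s.2.1 ++ [j], s.2.2 ++ [k])) s) s) ([], [], [])
  [s.1, s.2.1, s.2.2]

-- ===== PORT B =====
-- B: xs = each i repeated n*n times; ys = (each j repeated n times) block repeated n times;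
-- zs = range(z, z+arista) repeated n*n times, where n = max(arista, 0).
def obtenerPuntosSolidoCubo_alt (x : Int) (y : Int) (z : Int) (arista : Int) : List (List Int) :=
  let n := max arista 0
  let xs := (PySem.List.pyRange x (x + arista) 1).flatMap (fun i => List.replicate (n * n).toNat i)
  let ys := (List.replicate n.toNat
      ((PySem.List.pyRange y (y + arista) 1).flatMap (fun j => List.replicate n.toNat j))).flatten
  let zs := (List.replicate (n * n).toNat (PySem.List.pyRange z (z + arista) 1)).flatten
  [xs, ys, zs]

-- ===== PRECONDITION & SPEC =====
def Spec_obtenerPuntosSolidoCubo (x : Int) (y : Int) (z : Int) (arista : Int) (out : List (List Int)) : Prop := out = obtenerPuntosSolidoCubo_alt x y z arista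
instance (x : Int) (y : Int) (z : Int) (arista : Int) (out : List (List Int)) : Decidable (Spec_obtenerPuntosSolidoCubo x y z arista out) := by unfold Spec_obtenerPuntosSolidoCubo; infer_instance

-- ===== CLAIM (what is proved, stated in full; the proofs are below) =====
def Claim_equal_obtenerPuntosSolidoCubo : Prop := ∀ (x : Int) (y : Int) (z : Int) (arista : Int), Dom_obtenerPuntosSolidoCubo x y z arista → Spec_obtenerPuntosSolidoCubo x y z arista (obtenerPuntosSolidoCubo x y z arista)

-- ===== LEMMAS AND PROOFS =====

-- innermost loop: appends i, j and the loop variable itself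
theorem pvLoop3 (l : List Int) (i j : Int) (s : List Int × List Int × List Int) :
    l.foldl (fun s k => (s.1 ++ [i], s.2.1 ++ [j], s.2.2 ++ [k])) s
      = (s.1 ++ List.replicate l.length i, s.2.1 ++ List.replicate l.length j, s.2.2 ++ l) := by
  induction l generalizing s with
  | nil => simp
  | cons a t ih =>
      simp [List.foldl_cons, ih, List.replicate_succ, List.append_assoc]

-- middle loop
theorem pvLoop2 (l2 l3 : List Int) (i : Int) (s : List Int × List Int × List Int) :
    l2.foldl (fun s j => l3.foldl (fun s k => (s.1 ++ [i], s.2.1 ++ [j], s.2.2 ++ [k])) s) s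
      = (s.1 ++ List.replicate (l2.length * l3.length) i,
         s.2.1 ++ l2.flatMap (fun j => List.replicate l3.length j),
         s.2.2 ++ (List.replicate l2.length l3).flatten) := by
  induction l2 generalizing s with
  | nil => simp
  | cons a t ih =>
      rw [List.foldl_cons, pvLoop3, ih]
      have h : (t.length + 1) * l3.length = l3.length + t.length * l3.length := by ring
      rw [List.length_cons, List.replicate_succ, List.flatten_cons, List.flatMap_cons, h,
        List.replicate_add]
      simp [List.append_assoc]

-- outer loop
theorem pvLoop1 (l1 l2 l3 : List Int) (s : List Int × List Int × List Int) :
    l1.foldl (fun s i =>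
        l2.foldl (fun s j =>
          l3.foldl (fun s k => (s.1 ++ [i], s.2.1 ++ [j], s.2.2 ++ [k])) s) s) s
      = (s.1 ++ l1.flatMap (fun i => List.replicate (l2.length * l3.length) i),
         s.2.1 ++ (List.replicate l1.length (l2.flatMap (fun j => List.replicate l3.length j))).flatten,
         s.2.2 ++ (List.replicate (l1.length * l2.length) l3).flatten) := by
  induction l1 generalizing s with
  | nil => simp
  | cons a t ih =>
      rw [List.foldl_cons, pvLoop2, ih]
      have h : (t.length + 1) * l2.length = l2.length + t.length * l2.length := by ring
      rw [List.length_cons, List.replicate_succ, List.flatten_cons, List.flatMap_cons, h,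
        List.replicate_add, List.flatten_append]
      simp [List.append_assoc]

-- ===== VERDICT (by name: the statement is the Claim_ definition above) =====
theorem obtenerPuntosSolidoCubo_spec : Claim_equal_obtenerPuntosSolidoCubo := by
  intro x y z arista _
  unfold Spec_obtenerPuntosSolidoCubo obtenerPuntosSolidoCubo obtenerPuntosSolidoCubo_alt
  have hn : (max arista 0 * max arista 0).toNat = arista.toNat * arista.toNat := by
    rcases le_total 0 arista with h | h
    · obtain ⟨m, rfl⟩ := Int.eq_ofNat_of_zero_le h
      rw [max_eq_left h, ← Int.natCast_mul, Int.toNat_natCast, Int.toNat_natCast]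
    · simp [max_eq_right h, Int.toNat_of_nonpos h]
  have hm : (max arista 0).toNat = arista.toNat := by omega
  simp [pvLoop1, PySem.List.length_pyRange_one, hn, hm]
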